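-- pv_equiv track=rewrite | github.com/qparis/Python-Lighting-System | src/effects/OnOffSmooth.py | next_scene
-- ===== SOURCE A (Python) =====
-- def next_scene(i):
--     if i % 2 == 1:
--         return [{
--             1: 250 - i,
--             2: 255,
--             3: 255,
--             4: 255,
--             5: 0
--         } for i in range(0, 255, 50)]
--     else:
--         return [{
--             1: i,
--             2: 255,
--             3: 255,
--             4: 255,
--             5: 0
--         } for i in range(0, 255, 50)]
-- ===== SOURCE B (Python) =====
-- def next_scene(i):
--     # Single recursive builder parameterized by start/step instead of two
--     # duplicated range-comprehensions: walk from `start` in steps of `step`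
--     # while the brightness stays inside [0, 250], emitting one channel dict
--     # per step.
--     def build(v, step):
--         if not (0 <= v <= 250):
--             return []
--         return [{1: v, 2: 255, 3: 255, 4: 255, 5: 0}] + build(v + step, step)
--
--     if i % 2 == 1:
--         return build(250, -50)
--     return build(0, 50)
-- ===== Notes on version B (the rewrite author's own statement) =====
-- stated objective: alternative
-- what changed: B replaces the two duplicated range-comprehensions (one with a 250-i subtraction) by a single recursive builder that walks from a parity-chosen start value in a parity-chosen step direction, emitting dicts until the value leaves [0,250].
import Mathlib
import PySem

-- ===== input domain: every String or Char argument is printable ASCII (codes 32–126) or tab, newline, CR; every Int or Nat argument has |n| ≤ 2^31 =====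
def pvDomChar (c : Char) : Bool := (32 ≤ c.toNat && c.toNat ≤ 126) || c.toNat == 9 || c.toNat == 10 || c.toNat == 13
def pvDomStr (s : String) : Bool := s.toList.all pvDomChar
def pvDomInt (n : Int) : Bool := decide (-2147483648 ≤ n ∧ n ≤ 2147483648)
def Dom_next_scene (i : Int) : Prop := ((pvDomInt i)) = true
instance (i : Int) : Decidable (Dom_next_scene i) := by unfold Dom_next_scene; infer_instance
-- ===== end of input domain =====

-- B replaces the duplicated comprehensions by one recursive start/step builder (alternative decomposition).
-- ===== PORT A =====
def next_scene (i : Int) : List (List (Int × Int)) :=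
  if PySem.Int.mod i 2 = 1 then
    (PySem.List.pyRange 0 255 50).map (fun j =>
      (((((PySem.Dict.empty.insert 1 (250 - j)).insert 2 255).insert 3 255).insert 4 255).insert 5 0 : PySem.Dict Int Int).items)
  else
    (PySem.List.pyRange 0 255 50).map (fun j =>
      (((((PySem.Dict.empty.insert 1 j).insert 2 255).insert 3 255).insert 4 255).insert 5 0 : PySem.Dict Int Int).items)

-- ===== PORT B =====
-- B: one recursive builder walking from a parity-chosen start in a parity-chosen
-- step direction (fuel only guarantees termination; it is never exhausted on the
-- actual calls, which take at most 6 steps).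
def nsBuild : Nat → Int → Int → List (List (Int × Int))
  | 0, _, _ => []
  | fuel + 1, v, step =>
    if 0 ≤ v ∧ v ≤ 250 then
      (((((PySem.Dict.empty.insert 1 v).insert 2 255).insert 3 255).insert 4 255).insert 5 0 : PySem.Dict Int Int).items
        :: nsBuild fuel (v + step) step
    else []

def next_scene_alt (i : Int) : List (List (Int × Int)) :=
  if PySem.Int.mod i 2 = 1 then nsBuild 7 250 (-50) else nsBuild 7 0 50

-- ===== PRECONDITION & SPEC =====
def Spec_next_scene (i : Int) (out : List (List (Int × Int))) : Prop := out = next_scene_alt i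
instance (i : Int) (out : List (List (Int × Int))) : Decidable (Spec_next_scene i out) := by unfold Spec_next_scene; infer_instance

-- ===== CLAIM (what is proved, stated in full; the proofs are below) =====
def Claim_equal_next_scene : Prop := ∀ (i : Int), Dom_next_scene i → Spec_next_scene i (next_scene i)

-- ===== LEMMAS AND PROOFS =====

-- ===== VERDICT (by name: the statement is the Claim_ definition above) =====
theorem next_scene_spec : Claim_equal_next_scene := by
  intro i _
  unfold Spec_next_scene next_scene next_scene_alt
  by_cases h : PySem.Int.mod i 2 = 1
  · simp only [h, if_pos]
    decide
  · simp only [h, if_neg, not_false_iff]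
    decide
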